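-- pv_equiv track=rewrite | github.com/josean9/laberinto | laberinto.py | laberinto
-- ===== SOURCE A (Python) =====
-- def laberinto(FilaColumna, muros):
--     laberinto = []
--     for i in range(FilaColumna):
--         fila = []
--         for j in range(FilaColumna):
--             if tuple([i, j]) in muros:
--                 fila.append('X')
--             else:
--                 fila.append(' ')
--         laberinto.append(fila)
--     return laberinto
-- ===== SOURCE B (Python) =====
-- def laberinto(FilaColumna, muros):
--     # blank-fill then scatter the walls; returns same grid as A
--     grid = [[' '] * FilaColumna for _ in range(FilaColumna)]
--     for (r, c) in muros:
--         if 0 <= r < FilaColumna and 0 <= c < FilaColumna: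
--             grid[r][c] = 'X'
--     return grid
-- ===== Notes on version B (the rewrite author's own statement) =====
-- stated objective: faster
-- what changed: A scans muros for membership once per cell (n^2 scans); B blank-fills the grid and does one scatter pass over muros, bound-checking each wall coordinate.
import Mathlib
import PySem

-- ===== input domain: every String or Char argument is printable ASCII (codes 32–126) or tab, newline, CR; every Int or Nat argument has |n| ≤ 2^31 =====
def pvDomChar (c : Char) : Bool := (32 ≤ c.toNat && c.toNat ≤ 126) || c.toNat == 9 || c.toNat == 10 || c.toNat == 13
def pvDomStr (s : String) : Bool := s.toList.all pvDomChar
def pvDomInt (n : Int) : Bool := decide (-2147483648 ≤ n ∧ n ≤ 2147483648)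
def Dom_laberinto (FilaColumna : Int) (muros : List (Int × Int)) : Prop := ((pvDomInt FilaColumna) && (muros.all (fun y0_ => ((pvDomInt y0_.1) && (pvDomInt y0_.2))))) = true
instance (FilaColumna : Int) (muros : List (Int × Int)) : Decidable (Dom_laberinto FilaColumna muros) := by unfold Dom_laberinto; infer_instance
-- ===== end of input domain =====

-- B blank-fills an n×n grid of ' ' and then scatters 'X' once over muros (bound-checked),
-- instead of A's per-cell membership scan of muros; same return value.

-- ===== PORT A =====
def laberinto (FilaColumna : Int) (muros : List (Int × Int)) : List (List String) :=
  (PySem.List.pyRange 0 FilaColumna 1).foldl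
    (fun lab i =>
      lab ++ [(PySem.List.pyRange 0 FilaColumna 1).foldl
        (fun fila j => fila ++ [if (i, j) ∈ muros then "X" else " "]) []])
    []

-- ===== PORT B =====
def laberinto_alt (FilaColumna : Int) (muros : List (Int × Int)) : List (List String) :=
  muros.foldl
    (fun g p =>
      if 0 ≤ p.1 ∧ p.1 < FilaColumna ∧ 0 ≤ p.2 ∧ p.2 < FilaColumna then
        g.modify p.1.toNat (fun row => row.set p.2.toNat "X")
      else g)
    (List.replicate FilaColumna.toNat (List.replicate FilaColumna.toNat " "))

-- ===== PRECONDITION & SPEC =====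
def Spec_laberinto (FilaColumna : Int) (muros : List (Int × Int)) (out : List (List String)) : Prop := out = laberinto_alt FilaColumna muros
instance (FilaColumna : Int) (muros : List (Int × Int)) (out : List (List String)) : Decidable (Spec_laberinto FilaColumna muros out) := by unfold Spec_laberinto; infer_instance

-- ===== CLAIM (what is proved, stated in full; the proofs are below) =====
def Claim_equal_laberinto : Prop := ∀ (FilaColumna : Int) (muros : List (Int × Int)), Dom_laberinto FilaColumna muros → Spec_laberinto FilaColumna muros (laberinto FilaColumna muros)

-- ===== LEMMAS AND PROOFS =====

-- a for-loop that appends one element per iteration is the map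
theorem pv_foldl_append_map {α β : Type} (f : α → β) :
    ∀ (l : List α) (init : List β),
      l.foldl (fun acc x => acc ++ [f x]) init = init ++ l.map f := by
  intro l
  induction l with
  | nil => simp
  | cons x xs ih => intro init; simp [List.foldl_cons, ih]

-- the grid A builds, as a nested map over the range
def pvGrid (n : Int) (ms : List (Int × Int)) : List (List String) :=
  (PySem.List.pyRange 0 n 1).map
    (fun i => (PySem.List.pyRange 0 n 1).map (fun j => if (i, j) ∈ ms then "X" else " "))

theorem pv_A_eq_grid (n : Int) (ms : List (Int × Int)) :
    laberinto n ms = pvGrid n ms := by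
  unfold laberinto pvGrid
  rw [pv_foldl_append_map]
  simp only [List.nil_append]
  apply List.map_congr_left
  intro i _
  rw [pv_foldl_append_map]
  exact (List.nil_append _)

theorem pv_modify_map_pyRange {α : Type} (n : Int) (f : Int → α) (h : α → α) (r : Int)
    (h0 : 0 ≤ r) (_hr : r < n) :
    ((PySem.List.pyRange 0 n 1).map f).modify r.toNat h
      = (PySem.List.pyRange 0 n 1).map (fun i => if i = r then h (f i) else f i) := by
  apply List.ext_getElem
  · simp only [List.length_modify, List.length_map]
  · intro k h1 h2
    rw [List.getElem_modify]
    simp only [List.getElem_map]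
    rw [PySem.List.getElem_pyRange_one]
    by_cases hc : r.toNat = k
    · have he : (0 : Int) + k = r := by omega
      rw [if_pos hc, if_pos he]
    · have he : ¬ ((0 : Int) + k = r) := by omega
      rw [if_neg hc, if_neg he]

theorem pv_set_map_pyRange {α : Type} (n : Int) (f : Int → α) (v : α) (c : Int)
    (h0 : 0 ≤ c) (_hc : c < n) :
    ((PySem.List.pyRange 0 n 1).map f).set c.toNat v
      = (PySem.List.pyRange 0 n 1).map (fun j => if j = c then v else f j) := by
  apply List.ext_getElem
  · simp only [List.length_set, List.length_map]
  · intro k h1 h2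
    rw [List.getElem_set]
    simp only [List.getElem_map]
    rw [PySem.List.getElem_pyRange_one]
    by_cases hcc : c.toNat = k
    · have he : (0 : Int) + k = c := by omega
      rw [if_pos hcc, if_pos he]
    · have he : ¬ ((0 : Int) + k = c) := by omega
      rw [if_neg hcc, if_neg he]

-- one scatter step on the characterised grid extends the wall list
theorem pv_step_grid (n : Int) (ms : List (Int × Int)) (p : Int × Int) :
    (if 0 ≤ p.1 ∧ p.1 < n ∧ 0 ≤ p.2 ∧ p.2 < n then
        (pvGrid n ms).modify p.1.toNat (fun row => row.set p.2.toNat "X")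
      else pvGrid n ms)
      = pvGrid n (ms ++ [p]) := by
  obtain ⟨r, c⟩ := p
  by_cases hb : 0 ≤ r ∧ r < n ∧ 0 ≤ c ∧ c < n
  · rw [if_pos hb]
    unfold pvGrid
    rw [pv_modify_map_pyRange n _ _ r hb.1 hb.2.1]
    apply List.map_congr_left
    intro i _
    by_cases hi : i = r
    · rw [if_pos hi]
      rw [pv_set_map_pyRange n _ _ c hb.2.2.1 hb.2.2.2]
      apply List.map_congr_left
      intro j _
      by_cases hj : j = c
      · simp [hj, hi]
      · simp [hj, hi]
    · rw [if_neg hi]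
      apply List.map_congr_left
      intro j _
      have : ¬ ((i, j) = (r, c)) := by simp [Prod.ext_iff, hi]
      simp [this]
  · rw [if_neg hb]
    unfold pvGrid
    apply List.map_congr_left
    intro i hi
    apply List.map_congr_left
    intro j hj
    rw [PySem.List.mem_pyRange_one] at hi hj
    have : ¬ ((i, j) = (r, c)) := by
      simp only [Prod.mk.injEq, not_and]
      intro h1 h2
      exact hb ⟨h1 ▸ hi.1, h1 ▸ hi.2, h2 ▸ hj.1, h2 ▸ hj.2⟩
    simp [this]

theorem pv_blank_eq_grid (n : Int) :
    List.replicate n.toNat (List.replicate n.toNat " ") = pvGrid n [] := by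
  unfold pvGrid
  simp [PySem.List.length_pyRange_one]

theorem pv_scatter_grid (n : Int) :
    ∀ (ms acc : List (Int × Int)),
      ms.foldl
        (fun g p =>
          if 0 ≤ p.1 ∧ p.1 < n ∧ 0 ≤ p.2 ∧ p.2 < n then
            g.modify p.1.toNat (fun row => row.set p.2.toNat "X")
          else g)
        (pvGrid n acc) = pvGrid n (acc ++ ms) := by
  intro ms
  induction ms with
  | nil => intro acc; simp
  | cons p tl ih =>
    intro acc
    rw [List.foldl_cons, pv_step_grid n acc p, ih (acc ++ [p])]
    simp

theorem pv_B_eq_grid (n : Int) (ms : List (Int × Int)) :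
    laberinto_alt n ms = pvGrid n ms := by
  unfold laberinto_alt
  rw [pv_blank_eq_grid]
  simpa using pv_scatter_grid n ms []

-- ===== VERDICT (by name: the statement is the Claim_ definition above) =====
theorem laberinto_spec : Claim_equal_laberinto := by
  intro n ms _
  unfold Spec_laberinto
  rw [pv_A_eq_grid, pv_B_eq_grid]
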